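-- pv_equiv track=rewrite | github.com/WolodjaZ/NIDUC2 | program/koder_and_encoder.py | kode
-- ===== SOURCE A (Python) =====
-- def kode(bytes, size):
-- 	"""Applies algotrith triplling bits and packing them by size"""
-- 	pises_of_bytes = []
-- 	count_high = 0
-- 	count_lower = 0
-- 	for _ in bytes: # packing bits
-- 		if size == (count_high-count_lower):
-- 			pises_of_bytes.append(bytes[count_lower:count_high])
-- 			count_lower = count_high
--
-- 		count_high  += 1
-- 	if count_lower != count_high: #packing rest of bits
-- 		pises_of_bytes.append(bytes[count_lower:count_high])
--
-- 	byte = []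
-- 	for byte_t in pises_of_bytes: #trippling every bits in package
-- 		koded_byte = []
-- 		for byter in byte_t:
-- 			for _ in range(3):
-- 				koded_byte.append(byter)
--
-- 		byte.append(koded_byte)
--
--
-- 	return byte
-- ===== SOURCE B (Python) =====
-- def kode(bytes, size):
--     """Triple every element first, then chunk the flat stream by 3*size."""
--     flat = [b for b in bytes for _ in range(3)]
--     out = []
--     chunk = []
--     for x in flat:
--         if len(chunk) == 3 * size:
--             out.append(chunk)
--             chunk = []
--         chunk.append(x)
--     if chunk:
--         out.append(chunk)
--     return out
-- ===== Notes on version B (the rewrite author's own statement) =====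
-- stated objective: alternative
-- what changed: A slices the input into size-chunks with two counters and then triples each chunk with a triple-nested loop; B first builds one flat list tripling every element and then partitions it into chunks of 3*size with a single incremental accumulator, flushing the remainder at the end.
import Mathlib
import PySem

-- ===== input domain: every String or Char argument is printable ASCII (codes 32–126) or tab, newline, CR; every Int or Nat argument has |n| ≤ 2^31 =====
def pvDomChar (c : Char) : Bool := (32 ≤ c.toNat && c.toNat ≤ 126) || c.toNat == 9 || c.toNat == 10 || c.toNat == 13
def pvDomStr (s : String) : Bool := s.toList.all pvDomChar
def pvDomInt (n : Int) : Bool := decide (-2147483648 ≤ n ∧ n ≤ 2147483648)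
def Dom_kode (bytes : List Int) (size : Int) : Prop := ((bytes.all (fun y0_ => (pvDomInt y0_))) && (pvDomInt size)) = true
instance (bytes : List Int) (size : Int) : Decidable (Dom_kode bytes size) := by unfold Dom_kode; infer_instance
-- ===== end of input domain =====

-- B triples every element into one flat stream first and then chunks that stream by
-- 3*size with an incremental accumulator, instead of A's counter-based slicing followed
-- by a triple-nested tripling loop (alternative decomposition, same cost).


-- ===== PORT A =====
-- one iteration of A's packing loop (the loop body, verbatim)
def stepA (bytes : List Int) (size : Int) (st : List (List Int) × Int × Int) :
    List (List Int) × Int × Int :=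
  if size = st.2.1 - st.2.2 then
    (st.1 ++ [PySem.List.slice bytes (some st.2.2) (some st.2.1)], st.2.1 + 1, st.2.1)
  else
    (st.1, st.2.1 + 1, st.2.2)

def kode (bytes : List Int) (size : Int) : List (List Int) :=
  let st := bytes.foldl (fun st _ => stepA bytes size st) ([], 0, 0)
  let pises := if st.2.2 ≠ st.2.1 then
      st.1 ++ [PySem.List.slice bytes (some st.2.2) (some st.2.1)] else st.1
  pises.foldl (fun byte byte_t =>
    byte ++ [byte_t.foldl (fun kb byter => kb ++ [byter, byter, byter]) []]) []

-- ===== PORT B =====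
-- one iteration of B's chunking loop (the loop body, verbatim)
def stepB (size : Int) (st : List (List Int) × List Int) (x : Int) :
    List (List Int) × List Int :=
  if (st.2.length : Int) = 3 * size then (st.1 ++ [st.2], [x]) else (st.1, st.2 ++ [x])

def kode_alt (bytes : List Int) (size : Int) : List (List Int) :=
  let flat := bytes.flatMap (fun b => [b, b, b])
  let st := flat.foldl (stepB size) ([], [])
  if st.2 ≠ [] then st.1 ++ [st.2] else st.1

-- ===== PRECONDITION & SPEC =====
def Spec_kode (bytes : List Int) (size : Int) (out : List (List Int)) : Prop := out = kode_alt bytes size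
instance (bytes : List Int) (size : Int) (out : List (List Int)) : Decidable (Spec_kode bytes size out) := by unfold Spec_kode; infer_instance

-- ===== CLAIM (what is proved, stated in full; the proofs are below) =====
def Claim_equal_kode : Prop := ∀ (bytes : List Int) (size : Int), Dom_kode bytes size → Spec_kode bytes size (kode bytes size)

-- ===== LEMMAS AND PROOFS =====

-- tripling one chunk, as A's inner double loop computes it
def tri (l : List Int) : List Int := l.foldl (fun kb byter => kb ++ [byter, byter, byter]) []

theorem tri_foldl (l : List Int) : ∀ acc : List Int,
    l.foldl (fun kb byter => kb ++ [byter, byter, byter]) acc = acc ++ l.flatMap (fun b => [b, b, b]) := by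
  induction l with
  | nil => intro acc; simp
  | cons b t ih => intro acc; simp [List.foldl, ih]

theorem tri_eq (l : List Int) : tri l = l.flatMap (fun b => [b, b, b]) := by
  rw [tri, tri_foldl]
  simp

theorem tri_append (l : List Int) (b : Int) : tri (l ++ [b]) = tri l ++ [b, b, b] := by
  simp [tri_eq]

theorem tri_len (l : List Int) : (tri l).length = 3 * l.length := by
  rw [tri_eq]
  induction l with
  | nil => simp
  | cons b t ih => simp [ih]; ring

theorem tri_nil_iff (l : List Int) : tri l = [] ↔ l = [] := by
  cases l <;> simp [tri_eq]

theorem map_fold (pises : List (List Int)) : ∀ acc : List (List Int),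
    pises.foldl (fun byte byte_t =>
      byte ++ [byte_t.foldl (fun kb byter => kb ++ [byter, byter, byter]) []]) acc
      = acc ++ pises.map tri := by
  induction pises with
  | nil => intro acc; simp
  | cons c t ih =>
    intro acc
    have htri : c.foldl (fun kb byter => kb ++ [byter, byter, byter]) [] = tri c := rfl
    rw [List.foldl, htri, ih]
    simp

theorem foldl_flatMap_tri {σ : Type} (f : σ → Int → σ) (l : List Int) : ∀ s : σ,
    (l.flatMap (fun b => [b, b, b])).foldl f s = l.foldl (fun s b => f (f (f s b) b) b) s := by
  induction l with
  | nil => intro s; simp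
  | cons b t ih => intro s; simp [List.foldl, ih]

-- A's final packaging, after the packing loop
def finA (bytes : List Int) (st : List (List Int) × Int × Int) : List (List Int) :=
  (if st.2.2 ≠ st.2.1 then st.1 ++ [PySem.List.slice bytes (some st.2.2) (some st.2.1)] else st.1).map tri

-- B's final flush
def finB (st : List (List Int) × List Int) : List (List Int) :=
  if st.2 ≠ [] then st.1 ++ [st.2] else st.1

theorem slice_pref (pref rest : List Int) (cl : ℕ) (h : cl ≤ pref.length) :
    PySem.List.slice (pref ++ rest) (some (cl : Int)) (some (pref.length : Int)) = pref.drop cl := by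
  rw [PySem.List.slice_natCast, List.drop_append_of_le_length h]
  have hl : (List.drop cl pref).length = pref.length - cl := by simp
  rw [← hl, List.take_left]

theorem main_inv (size : Int) : ∀ (rest pref : List Int) (p : List (List Int)) (cl : ℕ),
    cl ≤ pref.length →
    finA (pref ++ rest)
      (rest.foldl (fun st _ => stepA (pref ++ rest) size st) (p, (pref.length : Int), (cl : Int)))
    = finB (rest.foldl (fun st b => stepB size (stepB size (stepB size st b) b) b)
        (p.map tri, tri (pref.drop cl))) := by
  intro rest
  induction rest with
  | nil =>
    intro pref p cl hcl
    simp only [List.foldl, List.append_nil]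
    by_cases hc : cl = pref.length
    · have h1 : pref.drop cl = [] := by rw [hc]; simp
      have hceq : (cl : Int) = (pref.length : Int) := by exact_mod_cast hc
      simp [finA, finB, h1, tri_eq, hceq]
    · have hlt : cl < pref.length := lt_of_le_of_ne hcl hc
      have hdrop : pref.drop cl ≠ [] := by
        intro h; have := congrArg List.length h; simp at this; omega
      have htri : tri (pref.drop cl) ≠ [] := by
        intro h; exact hdrop ((tri_nil_iff _).mp h)
      have hne : (cl : Int) ≠ (pref.length : Int) := by exact_mod_cast hc
      have hsl := slice_pref pref [] cl hcl
      rw [List.append_nil] at hsl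
      simp [finA, finB, hne, htri, hsl]
  | cons b rest' ih =>
    intro pref p cl hcl
    have hbytes : pref ++ b :: rest' = (pref ++ [b]) ++ rest' := by simp
    have hlen2 : pref.length ≤ (pref ++ [b]).length := by simp
    have hcl2 : cl ≤ (pref ++ [b]).length := by simp; omega
    have hchunklen : ((tri (pref.drop cl)).length : Int) = 3 * ((pref.length : Int) - (cl : Int)) := by
      have h0 := tri_len (pref.drop cl)
      simp at h0
      omega
    have hcast : ((pref.length : Int) + 1) = (((pref ++ [b]).length : ℕ) : Int) := by
      simp
    by_cases hs : size = (pref.length : Int) - (cl : Int)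
    · -- flush now
      have hstepA : stepA (pref ++ b :: rest') size (p, (pref.length : Int), (cl : Int))
          = (p ++ [pref.drop cl], (pref.length : Int) + 1, (pref.length : Int)) := by
        have hsl : PySem.List.slice (pref ++ b :: rest') (some (cl : Int)) (some (pref.length : Int))
            = pref.drop cl := slice_pref pref (b :: rest') cl hcl
        simp [stepA, hs, hsl]
      have hB1 : stepB size (p.map tri, tri (pref.drop cl)) b
          = (p.map tri ++ [tri (pref.drop cl)], [b]) := by
        have hc : ((tri (pref.drop cl)).length : Int) = 3 * size := by rw [hchunklen, hs]
        simp [stepB, hc]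
      have hB2 : stepB size (p.map tri ++ [tri (pref.drop cl)], [b]) b
          = (p.map tri ++ [tri (pref.drop cl)], [b, b]) := by
        simp [stepB]
        omega
      have hB3 : stepB size (p.map tri ++ [tri (pref.drop cl)], [b, b]) b
          = (p.map tri ++ [tri (pref.drop cl)], [b, b, b]) := by
        simp [stepB]
        omega
      have hdrop2 : (pref ++ [b]).drop pref.length = [b] := by
        rw [List.drop_append_of_le_length (Nat.le_refl _)]; simp
      have htb : tri [b] = [b, b, b] := by simp [tri_eq]
      simp only [List.foldl]
      rw [hstepA, hB1, hB2, hB3, hbytes, hcast]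
      have hih := ih (pref ++ [b]) (p ++ [pref.drop cl]) pref.length hlen2
      rw [hdrop2, htb] at hih
      simpa using hih
    · -- no flush
      have hstepA : stepA (pref ++ b :: rest') size (p, (pref.length : Int), (cl : Int))
          = (p, (pref.length : Int) + 1, (cl : Int)) := by
        simp [stepA, hs]
      have hne3 : ¬(((tri (pref.drop cl)).length : Int) = 3 * size) := by
        rw [hchunklen]; intro h; apply hs; omega
      have hB1 : stepB size (p.map tri, tri (pref.drop cl)) b
          = (p.map tri, tri (pref.drop cl) ++ [b]) := by
        simp [stepB, hne3]
      have hB2 : stepB size (p.map tri, tri (pref.drop cl) ++ [b]) b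
          = (p.map tri, tri (pref.drop cl) ++ [b, b]) := by
        simp [stepB]
        omega
      have hB3 : stepB size (p.map tri, tri (pref.drop cl) ++ [b, b]) b
          = (p.map tri, tri (pref.drop cl) ++ [b, b, b]) := by
        simp [stepB]
        omega
      have hdrop2 : (pref ++ [b]).drop cl = pref.drop cl ++ [b] := by
        rw [List.drop_append_of_le_length hcl]
      simp only [List.foldl]
      rw [hstepA, hB1, hB2, hB3, hbytes, hcast]
      have hih := ih (pref ++ [b]) p cl hcl2
      rw [hdrop2, tri_append] at hih
      exact hih

theorem kode_eq_finA (bytes : List Int) (size : Int) :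
    kode bytes size = finA bytes (bytes.foldl (fun st _ => stepA bytes size st) ([], 0, 0)) := by
  simp only [kode, finA]
  rw [map_fold]
  simp

theorem kode_alt_eq_finB (bytes : List Int) (size : Int) :
    kode_alt bytes size
      = finB (bytes.foldl (fun st b => stepB size (stepB size (stepB size st b) b) b) ([], [])) := by
  simp only [kode_alt, finB]
  rw [foldl_flatMap_tri]

-- ===== VERDICT (by name: the statement is the Claim_ definition above) =====
theorem kode_spec : Claim_equal_kode := by
  intro bytes size _
  unfold Spec_kode
  rw [kode_eq_finA, kode_alt_eq_finB]
  have h := main_inv size bytes [] [] 0 (by simp)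
  simpa [tri_eq] using h
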